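-- pv_equiv track=rewrite | github.com/raeez/chiral-bar-cobar | compute/lib/niemeier_shadow_depth_engine.py | modular_forms_dimension_table
-- ===== SOURCE A (Python) =====
-- from typing import Any, Dict, List, Optional, Tuple
--
-- def dim_M_k(k: int) -> int:
--     r"""Dimension of M_k(SL(2,Z)), the space of modular forms of weight k.
--
--     Formula (standard, cf. Zagier "Modular Forms" or Diamond-Shurman Ch. 3):
--         dim M_k = 0           if k odd or k < 0
--         dim M_k = 1           if k = 0
--         dim M_k = 0           if k = 2
--         dim M_k = floor(k/12) if k >= 4 and k = 2 mod 12
--         dim M_k = floor(k/12) + 1  if k >= 4 and k != 2 mod 12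
--
--     # VERIFIED [DC] direct formula, [LT] Diamond-Shurman Thm 3.5.1,
--     #   [LC] k=0 -> 1, k=12 -> 2 matches {E_12, Delta}.
--     """
--     if k < 0 or k % 2 != 0:
--         return 0
--     if k == 0:
--         return 1
--     if k == 2:
--         # VERIFIED [DC] no weight-2 modular forms for SL(2,Z),
--         #   [LT] Diamond-Shurman Cor 3.5.2, [LC] E_2 is quasi-modular not modular.
--         return 0
--     # k >= 4, even
--     q, r = divmod(k, 12)
--     if r == 2:
--         return q
--     else:
--         return q + 1
--
-- def dim_S_k(k: int) -> int:
--     r"""Dimension of S_k(SL(2,Z)), the space of cusp forms of weight k.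
--
--     Formula: dim S_k = max(0, dim M_k - 1) for k >= 2.
--     For k < 2: dim S_k = 0.
--
--     # VERIFIED [DC] dim S_k = dim M_k - 1 (subtract Eisenstein space, which
--     #   is 1-dimensional for k >= 4 even), [LT] Diamond-Shurman Thm 3.5.1,
--     #   [LC] k=12: dim M_12=2, dim S_12=1 (Ramanujan Delta).
--     """
--     if k < 2:
--         return 0
--     return max(0, dim_M_k(k) - 1)
--
-- def modular_forms_dimension_table(max_weight: int = 30) -> List[Dict[str, int]]:
--     """Dimension table for M_k and S_k for even k up to max_weight.
--
--     # VERIFIED [DC] formula, [LT] Diamond-Shurman Table 3.2.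
--     """
--     table = []
--     for k in range(0, max_weight + 1, 2):
--         table.append({
--             'k': k,
--             'dim_M_k': dim_M_k(k),
--             'dim_S_k': dim_S_k(k),
--         })
--     return table
-- ===== SOURCE B (Python) =====
-- # B: dynamic programming — dim M_k = dim M_{k-12} + 1, carried through the table
-- # by a six-entry sliding window over a base row, instead of A's closed-form
-- # divmod case analysis per weight.
-- _BASE = [1, 0, 1, 1, 1, 1]  # dim M_k for the first six even weights
--
-- def modular_forms_dimension_table(max_weight: int = 30):
--     table = []
--     window = []  # dim M for the last (up to) six even weights
--     for k in range(0, max_weight + 1, 2):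
--         m = window[0] + 1 if len(window) == 6 else _BASE[len(window)]
--         window.append(m)
--         if len(window) > 6:
--             window.pop(0)
--         table.append({'k': k, 'dim_M_k': m, 'dim_S_k': max(0, m - 1)})
--     return table
-- ===== Notes on version B (the rewrite author's own statement) =====
-- stated objective: alternative
-- what changed: dim_M_k's closed-form divmod case analysis is replaced by dynamic programming across the table: each row's dimension is read off as dims[-6]+1 (the recurrence dim M_k = dim M_{k-12} + 1) from a six-entry base row, and dim_S_k is max(0, m-1) with no separate k<2 branch.
import Mathlib
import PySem

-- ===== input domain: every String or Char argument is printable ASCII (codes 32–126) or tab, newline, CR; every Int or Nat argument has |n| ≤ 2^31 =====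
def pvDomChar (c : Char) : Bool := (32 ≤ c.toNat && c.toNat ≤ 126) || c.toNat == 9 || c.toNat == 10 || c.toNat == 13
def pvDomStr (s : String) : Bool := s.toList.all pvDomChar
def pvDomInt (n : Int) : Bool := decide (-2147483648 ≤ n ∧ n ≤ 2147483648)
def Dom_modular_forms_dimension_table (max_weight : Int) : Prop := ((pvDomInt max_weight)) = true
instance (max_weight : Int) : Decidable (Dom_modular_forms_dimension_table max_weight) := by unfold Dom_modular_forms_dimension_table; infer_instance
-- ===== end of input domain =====

-- B replaces A's per-weight closed-form divmod case analysis for dim_M_k by a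
-- dynamic-programming pass over the table (dim M_k = dim M_{k-12} + 1, carried by a
-- six-entry sliding window over a base row); genuinely different algorithm, similar cost.


-- ===== PORT A =====
def pv_dim_M_k (k : Int) : Int :=
  if k < 0 ∨ PySem.Int.mod k 2 ≠ 0 then 0
  else if k = 0 then 1
  else if k = 2 then 0
  else
    -- k >= 4, even; q, r = divmod(k, 12)
    let q := PySem.Int.floordiv k 12
    let r := PySem.Int.mod k 12
    if r = 2 then q else q + 1

def pv_dim_S_k (k : Int) : Int :=
  if k < 2 then 0 else max 0 (pv_dim_M_k k - 1)

def modular_forms_dimension_table (max_weight : Int) : List (List (String × Int)) :=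
  (PySem.List.pyRange 0 (max_weight + 1) 2).foldl
    (fun table k =>
      table ++ [[("k", k), ("dim_M_k", pv_dim_M_k k), ("dim_S_k", pv_dim_S_k k)]]) []

-- ===== PORT B =====
def pvBase : List Int := [1, 0, 1, 1, 1, 1]  -- dim M_k for the first six even weights

-- one iteration of B's loop: state = (window, table); window.pop(0) ported as drop 1
def pvStepB (st : List Int × List (List (String × Int))) (k : Int) :
    List Int × List (List (String × Int)) :=
  let window := st.1
  let m := if window.length = 6 then PySem.List.pyGetD window 0 0 + 1
           else PySem.List.pyGetD pvBase (window.length : Int) 0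
  let w1 := window ++ [m]
  let w2 := if 6 < w1.length then w1.drop 1 else w1
  (w2, st.2 ++ [[("k", k), ("dim_M_k", m), ("dim_S_k", max 0 (m - 1))]])

def modular_forms_dimension_table_alt (max_weight : Int) : List (List (String × Int)) :=
  ((PySem.List.pyRange 0 (max_weight + 1) 2).foldl pvStepB ([], [])).2

-- ===== PRECONDITION & SPEC =====
def Spec_modular_forms_dimension_table (max_weight : Int) (out : List (List (String × Int))) : Prop := out = modular_forms_dimension_table_alt max_weight
instance (max_weight : Int) (out : List (List (String × Int))) : Decidable (Spec_modular_forms_dimension_table max_weight out) := by unfold Spec_modular_forms_dimension_table; infer_instance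

-- ===== CLAIM (what is proved, stated in full; the proofs are below) =====
def Claim_equal_modular_forms_dimension_table : Prop := ∀ (max_weight : Int), Dom_modular_forms_dimension_table max_weight → Spec_modular_forms_dimension_table max_weight (modular_forms_dimension_table max_weight)

-- ===== LEMMAS AND PROOFS =====

-- one row of the table, at even weight 2*n
def pvRow (n : Nat) : List (String × Int) :=
  [("k", (2 * n : Int)), ("dim_M_k", pv_dim_M_k (2 * n)), ("dim_S_k", pv_dim_S_k (2 * n))]

-- base cases: A's dimension formula agrees with B's base row for the first six even weights
theorem pv_dim_base (n : Nat) (h : n < 6) :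
    pv_dim_M_k (2 * n) = PySem.List.pyGetD pvBase (n : Int) 0 := by
  interval_cases n <;> decide

-- the recurrence dim M_{2n} = dim M_{2n-12} + 1 holds for A's formula when n ≥ 6
theorem pv_dim_rec (n : Nat) (h : 6 ≤ n) :
    pv_dim_M_k (2 * n) = pv_dim_M_k (2 * ((n : Int) - 6)) + 1 := by
  obtain ⟨m, rfl⟩ : ∃ m, n = m + 6 := ⟨n - 6, by omega⟩
  simp only [pv_dim_M_k]
  rw [PySem.Int.mod_eq_emod_of_pos (by omega), PySem.Int.mod_eq_emod_of_pos (by omega),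
      PySem.Int.mod_eq_emod_of_pos (by omega), PySem.Int.mod_eq_emod_of_pos (by omega),
      PySem.Int.floordiv_eq_ediv_of_pos (by omega), PySem.Int.floordiv_eq_ediv_of_pos (by omega)]
  push_cast
  split_ifs <;> omega

-- A's dim_S_k agrees with B's max-formula at every even nonnegative weight
theorem pv_dim_S_eq (n : Nat) :
    pv_dim_S_k (2 * n) = max 0 (pv_dim_M_k (2 * n) - 1) := by
  match n with
  | 0 => decide
  | Nat.succ m =>
    simp only [pv_dim_S_k]
    rw [if_neg (by push_cast; omega)]

-- B's loop invariant: the window holds A's dimensions for the last ≤ 6 even weights,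
-- and the table holds A's rows
theorem pvStepB_invariant (N : Nat) :
    ((List.range N).map (fun j : Nat => 2 * (j : Int))).foldl pvStepB ([], [])
      = (((List.range N).map (fun j : Nat => pv_dim_M_k (2 * (j : Int)))).drop (N - 6),
         (List.range N).map pvRow) := by
  induction N with
  | zero => simp
  | succ N ih =>
    rw [List.range_succ, List.map_append, List.foldl_append, ih]
    simp only [List.map_append, List.map_singleton, List.foldl_cons, List.foldl_nil]
    unfold pvStepB
    simp only [List.length_drop, List.length_map, List.length_range, List.length_append,
      List.length_singleton]
    by_cases h6 : N < 6
    · rw [show N - 6 = 0 from by omega, if_neg (by omega), show (N + 1) - 6 = 0 from by omega]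
      simp only [List.drop_zero, Nat.sub_zero]
      rw [if_neg (show ¬ N = 6 from by omega), ← pv_dim_base N h6]
      simp [pvRow, pv_dim_S_eq N]
    · rw [if_pos (by omega), if_pos (by omega)]
      have hlen : N - 6 < ((List.range N).map (fun j : Nat => pv_dim_M_k (2 * (j : Int)))).length := by
        simp; omega
      rw [PySem.List.pyGetD_zero, List.getD_eq_getElem?_getD, List.getElem?_drop,
        Nat.add_zero, List.getElem?_map, List.getElem?_range (by omega)]
      simp only [Option.map_some, Option.getD_some]
      rw [show ((N - 6 : Nat) : Int) = (N : Int) - 6 from by omega, ← pv_dim_rec N (by omega)]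
      rw [List.drop_append_of_le_length (by simp; try omega),
        List.drop_append_of_le_length (by simp; try omega), List.drop_drop,
        show N - 6 + 1 = (N + 1) - 6 from by omega]
      simp [pvRow, pv_dim_S_eq N]

-- A's append-fold is a map
theorem pvA_fold (l : List Int) (acc : List (List (String × Int))) :
    l.foldl (fun table k =>
      table ++ [[("k", k), ("dim_M_k", pv_dim_M_k k), ("dim_S_k", pv_dim_S_k k)]]) acc
    = acc ++ l.map (fun k => [("k", k), ("dim_M_k", pv_dim_M_k k), ("dim_S_k", pv_dim_S_k k)]) := by
  induction l generalizing acc with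
  | nil => simp
  | cons x xs ih => simp [ih]

theorem pv_tables_eq (max_weight : Int) :
    modular_forms_dimension_table max_weight = modular_forms_dimension_table_alt max_weight := by
  unfold modular_forms_dimension_table modular_forms_dimension_table_alt
  rw [PySem.List.pyRange_of_pos 0 (max_weight + 1) (by norm_num)]
  simp only [zero_add]
  rw [pvA_fold, pvStepB_invariant]
  simp [pvRow, Function.comp]

-- ===== VERDICT (by name: the statement is the Claim_ definition above) =====
theorem modular_forms_dimension_table_spec : Claim_equal_modular_forms_dimension_table := by
  intro max_weight _
  exact pv_tables_eq max_weight
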